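-- pv_equiv track=rewrite | github.com/joycao1/splash-hyena | carrots_merge_stream.py | build_sequences
-- ===== SOURCE A (Python) =====
-- from collections import defaultdict, Counter
--
-- def build_sequences(counts, order_hint):
--     """
--     Build concatenated sequence per CBC.
--     Anchor order: by descending total anchor count (from order_hint).
--     Targets within anchor: by descending count.
--     """
--     by_cbc_anchor = defaultdict(lambda: defaultdict(list))  # cbc -> anchor -> [(target, count)]
--     for (cbc, anchor, target), c in counts.items():
--         by_cbc_anchor[cbc][anchor].append((target, c))
--
--     cbc_to_seq = {}
--     for cbc, anchor_map in by_cbc_anchor.items():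
--         # order anchors by total count desc; fallback to name
--         anchors_sorted = sorted(
--             anchor_map.keys(),
--             key=lambda a: (-order_hint[cbc].get(a, 0), a)
--         )
--         parts = []
--         for anchor in anchors_sorted:
--             parts.append(anchor)
--             # sort targets by count desc, then lexicographically for stability
--             targets_sorted = sorted(anchor_map[anchor], key=lambda tc: (-tc[1], tc[0]))
--             parts.extend([t for (t, _) in targets_sorted])
--         cbc_to_seq[cbc] = "".join(parts)
--     return cbc_to_seq
-- ===== SOURCE B (Python) =====
-- def build_sequences(counts, order_hint):
--     # Group all records by cbc only, then one global sort per cbc with a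
--     # composite key, then a single grouping pass emitting anchors on change.
--     groups = {}
--     for (cbc, anchor, target), c in counts.items():
--         groups.setdefault(cbc, []).append((anchor, target, c))
--     out = {}
--     for cbc, recs in groups.items():
--         hint = order_hint[cbc]
--         recs.sort(key=lambda r: (-hint.get(r[0], 0), r[0], -r[2], r[1]))
--         parts = []
--         prev = None
--         for anchor, target, _c in recs:
--             if prev != anchor:
--                 parts.append(anchor)
--                 prev = anchor
--             parts.append(target)
--         out[cbc] = "".join(parts)
--     return out
-- ===== Notes on version B (the rewrite author's own statement) =====
-- stated objective: alternative
-- what changed: B replaces A's nested cbc->anchor->targets grouping with per-anchor sorts by a flat per-cbc grouping, ONE global sort per cbc with the composite key (-hint, anchor, -count, target), and a single grouping pass that emits the anchor whenever it changes.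
-- outside the precondition, e.g. on build_sequences({('c', 'a', 't'): 1}, {}): A raises KeyError, B raises KeyError
import Mathlib
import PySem

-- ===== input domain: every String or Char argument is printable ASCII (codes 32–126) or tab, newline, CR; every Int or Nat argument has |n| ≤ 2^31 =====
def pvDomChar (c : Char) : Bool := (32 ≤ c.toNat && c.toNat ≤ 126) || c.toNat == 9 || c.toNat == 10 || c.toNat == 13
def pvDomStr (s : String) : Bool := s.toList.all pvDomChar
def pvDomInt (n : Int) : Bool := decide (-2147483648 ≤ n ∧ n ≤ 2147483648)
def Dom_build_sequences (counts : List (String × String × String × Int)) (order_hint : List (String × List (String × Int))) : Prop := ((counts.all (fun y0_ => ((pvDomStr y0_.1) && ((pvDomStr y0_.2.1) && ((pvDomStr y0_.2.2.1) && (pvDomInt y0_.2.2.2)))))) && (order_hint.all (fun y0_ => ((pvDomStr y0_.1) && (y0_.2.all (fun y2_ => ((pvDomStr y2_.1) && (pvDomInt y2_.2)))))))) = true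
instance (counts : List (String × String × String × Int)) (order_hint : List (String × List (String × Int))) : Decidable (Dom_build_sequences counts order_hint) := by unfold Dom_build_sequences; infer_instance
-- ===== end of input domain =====

-- B replaces A's nested cbc→anchor grouping plus per-anchor sorts by a flat per-cbc grouping,
-- ONE global sort with a composite 4-part key, and a single grouping pass (objective: alternative).

-- order_hint[cbc] as a dict (shared input decoding: Python's dict-of-dicts arrives as a list of lists)
def pvHintDict (order_hint : List (String × List (String × Int))) (cbc : String) : PySem.Dict String Int :=
  PySem.Dict.ofList ((PySem.Dict.ofList order_hint).getD cbc [])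

-- ===== PORT A =====
def build_sequences (counts : List (String × String × String × Int)) (order_hint : List (String × List (String × Int))) : List (String × String) :=
  -- by_cbc_anchor = defaultdict(lambda: defaultdict(list)); append (target, c)
  let by_cbc_anchor : PySem.Dict String (PySem.Dict String (List (String × Int))) :=
    counts.foldl (fun d r =>
      d.modify r.1 PySem.Dict.empty (fun inner => inner.modify r.2.1 [] (fun l => l ++ [(r.2.2.1, r.2.2.2)])))
      PySem.Dict.empty
  let cbc_to_seq : PySem.Dict String String :=
    by_cbc_anchor.items.foldl (fun acc p =>
      let hint := pvHintDict order_hint p.1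
      let anchors_sorted := PySem.List.sorted2 p.2.keys (fun a => -(hint.getD a 0)) (fun a => a)
      let parts : List String := anchors_sorted.foldl (fun parts anchor =>
        let targets_sorted := PySem.List.sorted2 (p.2.getD anchor []) (fun tc => -tc.2) (fun tc => tc.1)
        (parts ++ [anchor]) ++ targets_sorted.map (fun tc => tc.1)) []
      acc.insert p.1 (PySem.Str.join "" parts)) PySem.Dict.empty
  cbc_to_seq.items

-- ===== PORT B =====
-- the composite sort key (-hint.get(anchor,0), anchor, -c, target) as a lexicographic tuple
def pvKeyB (hint : PySem.Dict String Int) (r : String × String × Int) : Int ×ₗ (String ×ₗ (Int ×ₗ String)) :=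
  toLex (-(hint.getD r.1 0), toLex (r.1, toLex (-r.2.2, r.2.1)))

-- one step of B's grouping pass: append the anchor whenever it differs from the previous one
def pvStepB (st : List String × Option String) (r : String × String × Int) : List String × Option String :=
  if st.2 ≠ some r.1 then (st.1 ++ [r.1] ++ [r.2.1], some r.1) else (st.1 ++ [r.2.1], st.2)

def build_sequences_alt (counts : List (String × String × String × Int)) (order_hint : List (String × List (String × Int))) : List (String × String) :=
  let groups : PySem.Dict String (List (String × String × Int)) :=
    counts.foldl (fun d r => d.modify r.1 [] (fun l => l ++ [(r.2.1, r.2.2.1, r.2.2.2)])) PySem.Dict.empty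
  let out : PySem.Dict String String :=
    groups.items.foldl (fun out p =>
      let hint := pvHintDict order_hint p.1
      let recs := PySem.List.sorted p.2 (pvKeyB hint)
      let st := recs.foldl pvStepB ([], none)
      out.insert p.1 (PySem.Str.join "" st.1)) PySem.Dict.empty
  out.items

-- ===== PRECONDITION & SPEC =====
-- Pre_ excludes (i) counts lists repeating a (cbc, anchor, target) triple — counts is a Python dict
-- keyed by those triples, so such a list is not a faithful encoding of any dict input — and
-- (ii) inputs where some cbc of counts is missing from order_hint, on which A raises KeyError.
def Pre_build_sequences (counts : List (String × String × String × Int)) (order_hint : List (String × List (String × Int))) : Prop :=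
  (counts.map (fun r => (r.1, r.2.1, r.2.2.1))).Nodup ∧
  ∀ r ∈ counts, r.1 ∈ order_hint.map (fun p => p.1)
instance (counts : List (String × String × String × Int)) (order_hint : List (String × List (String × Int))) : Decidable (Pre_build_sequences counts order_hint) := by unfold Pre_build_sequences; infer_instance

def pvWitness_build_sequences : (List (String × String × String × Int)) × (List (String × List (String × Int))) :=
  ([("c", "a", "t", 2), ("c", "b", "u", 1)], [("c", [("a", 1)])])

def Spec_build_sequences (counts : List (String × String × String × Int)) (order_hint : List (String × List (String × Int))) (out : List (String × String)) : Prop := out = build_sequences_alt counts order_hint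
instance (counts : List (String × String × String × Int)) (order_hint : List (String × List (String × Int))) (out : List (String × String)) : Decidable (Spec_build_sequences counts order_hint out) := by unfold Spec_build_sequences; infer_instance

-- ===== CLAIM (what is proved, stated in full; the proofs are below) =====
def Claim_equal_build_sequences : Prop := ∀ (counts : List (String × String × String × Int)) (order_hint : List (String × List (String × Int))), Dom_build_sequences counts order_hint → Pre_build_sequences counts order_hint → Spec_build_sequences counts order_hint (build_sequences counts order_hint)

-- ===== LEMMAS AND PROOFS =====

-- `sorted2` with LinearOrder keys is `sorted` with the lexicographic pair key
theorem pv_insertBy_map {α β : Type} (before : β → β → Bool) (f : α → β) (x : α) (acc : List α) :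
    PySem.List.insertBy before (f x) (acc.map f)
      = (PySem.List.insertBy (fun a b => before (f a) (f b)) x acc).map f := by
  induction acc with
  | nil => rfl
  | cons y ys ih =>
    simp only [List.map_cons, PySem.List.insertBy]
    split
    · simp
    · simp [ih]

theorem pv_sorted_map {α β κ : Type} [LT κ] [DecidableLT κ] (f : α → β) (xs : List α) (key : β → κ) :
    PySem.List.sorted (xs.map f) key = (PySem.List.sorted xs (fun x => key (f x))).map f := by
  simp only [PySem.List.sorted, if_neg (by decide : ¬((false : Bool) = true))]
  rw [List.foldl_map]
  suffices h : ∀ (acc : List α), xs.foldl (fun acc x => PySem.List.insertBy (fun a b => decide (key a < key b)) (f x) acc) (acc.map f)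
      = (xs.foldl (fun acc x => PySem.List.insertBy (fun a b => decide (key (f a) < key (f b))) x acc) acc).map f by
    simpa using h []
  induction xs with
  | nil => intro acc; rfl
  | cons x xs ih =>
    intro acc
    simp only [List.foldl_cons]
    rw [pv_insertBy_map, ih]

theorem pv_sorted2_eq_sorted_lex {α κ₁ κ₂ : Type} [LinearOrder κ₁] [LinearOrder κ₂]
    (xs : List α) (k1 : α → κ₁) (k2 : α → κ₂) :
    PySem.List.sorted2 xs k1 k2 = PySem.List.sorted xs (fun x => toLex (k1 x, k2 x)) := by
  simp only [PySem.List.sorted2, PySem.List.sorted, if_neg (by decide : ¬((false : Bool) = true))]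
  have h : (fun a b => (decide (k1 a < k1 b) || (!decide (k1 b < k1 a) && decide (k2 a < k2 b))))
      = fun (a b : α) => decide ((toLex (k1 a, k2 a) : κ₁ ×ₗ κ₂) < toLex (k1 b, k2 b)) := by
    funext a b
    rcases lt_trichotomy (k1 a) (k1 b) with h | h | h
    · simp [Prod.Lex.toLex_lt_toLex, h, h.asymm]
    · simp [Prod.Lex.toLex_lt_toLex, h]
    · simp [Prod.Lex.toLex_lt_toLex, h, h.asymm, h.ne']
  rw [h]

-- getD after a fold of modifies at computed keys = fold of the updates over the filtered list
theorem pv_getD_foldl_modify_filter {κ ν β : Type} [BEq κ] [LawfulBEq κ] [DecidableEq κ]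
    (l : List β) (key : β → κ) (d0 : ν) (f : β → ν → ν) (d : PySem.Dict κ ν) (c : κ) :
    (l.foldl (fun d x => d.modify (key x) d0 (f x)) d).getD c d0
      = (l.filter (fun x => key x == c)).foldl (fun v x => f x v) (d.getD c d0) := by
  induction l generalizing d with
  | nil => rfl
  | cons x l ih =>
    simp only [List.foldl_cons, List.filter_cons]
    rw [ih, PySem.Dict.getD_modify]
    by_cases h : c = key x
    · simp [h]
    · rw [if_neg h, if_neg (by simpa using fun hx : key x = c => h hx.symm)]

theorem pv_flatMap_congr_mem {α β : Type} {l : List α} {f g : α → List β}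
    (h : ∀ a ∈ l, f a = g a) : l.flatMap f = l.flatMap g := by
  induction l with
  | nil => rfl
  | cons a l ih =>
    simp only [List.flatMap_cons]
    rw [h a (by simp), ih (fun a ha => h a (by simp [ha]))]

-- distributing a list over the filters of a nodup covering key list is a permutation
theorem pv_perm_flatMap_congr {α β : Type} {l : List α} {f g : α → List β}
    (h : ∀ a ∈ l, (f a).Perm (g a)) : (l.flatMap f).Perm (l.flatMap g) := by
  induction l with
  | nil => rfl
  | cons a l ih =>
    simp only [List.flatMap_cons]
    exact (h a (by simp)).append (ih (fun a ha => h a (by simp [ha])))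

theorem pv_perm_flatMap_filter {γ : Type} (key : γ → String) :
    ∀ (as : List String) (M : List γ), as.Nodup → (∀ r ∈ M, key r ∈ as) →
    (as.flatMap (fun a => M.filter (fun r => key r == a))).Perm M := by
  intro as
  induction as with
  | nil =>
    intro M _ hcov
    have : M = [] := List.eq_nil_iff_forall_not_mem.mpr (fun r hr => by simpa using hcov r hr)
    simp [this]
  | cons a as ih =>
    intro M hnd hcov
    simp only [List.flatMap_cons]
    have hrw : as.flatMap (fun a' => M.filter (fun r => key r == a'))
        = as.flatMap (fun a' => (M.filter (fun r => !(key r == a))).filter (fun r => key r == a')) := by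
      refine pv_flatMap_congr_mem (fun a' ha' => ?_)
      rw [List.filter_filter]
      refine (List.filter_congr (fun r _ => ?_)).symm
      by_cases h : key r = a'
      · have hne : a' ≠ a := fun he => (List.nodup_cons.mp hnd).1 (he ▸ ha')
        simp [h, hne]
      · simp [h]
    rw [hrw]
    have hperm := ih (M.filter (fun r => !(key r == a))) (List.nodup_cons.mp hnd).2
      (fun r hr => by
        have hm := List.mem_filter.mp hr
        have hne : key r ≠ a := by simpa using hm.2
        rcases List.mem_cons.mp (hcov r hm.1) with h | h
        · exact absurd h hne
        · exact h)
    exact (hperm.append_left _).trans (List.filter_append_perm _ M)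

-- B's grouping pass over a constant-anchor list just appends the targets
theorem pv_pass_const (a : String) :
    ∀ (l : List (String × String × Int)) (parts : List String), (∀ r ∈ l, r.1 = a) →
    l.foldl pvStepB (parts, some a) = (parts ++ l.map (fun r => r.2.1), some a) := by
  intro l
  induction l with
  | nil => intro parts _; simp
  | cons q l ih =>
    intro parts hc
    have hq : q.1 = a := hc q (by simp)
    rw [List.foldl_cons, show pvStepB (parts, some a) q = (parts ++ [q.2.1], some a) by
      simp [pvStepB, hq]]
    rw [ih (parts ++ [q.2.1]) (fun r hr => hc r (by simp [hr]))]
    simp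

-- B's grouping pass over one nonempty block with a fresh anchor
theorem pv_pass_block (a : String) (l : List (String × String × Int)) (parts : List String)
    (prev : Option String) (hne : l ≠ []) (hc : ∀ r ∈ l, r.1 = a) (hp : prev ≠ some a) :
    l.foldl pvStepB (parts, prev) = (parts ++ a :: l.map (fun r => r.2.1), some a) := by
  cases l with
  | nil => exact absurd rfl hne
  | cons q l =>
    have hq : q.1 = a := hc q (by simp)
    simp only [List.foldl_cons, pvStepB, hq, ne_eq, if_pos (by simpa using hp)]
    rw [pv_pass_const a l (parts ++ [a] ++ [q.2.1]) (fun r hr => hc r (by simp [hr]))]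
    simp

-- B's grouping pass over a flatMap of nonempty constant-anchor blocks with pairwise-distinct anchors
theorem pv_pass_blocks (f : String → List (String × String × Int)) :
    ∀ (as : List String), (∀ a ∈ as, f a ≠ [] ∧ ∀ r ∈ f a, r.1 = a) → as.Pairwise (fun a b => a ≠ b) →
    ∀ (parts : List String) (prev : Option String), (∀ a ∈ as, prev ≠ some a) →
    ((as.flatMap f).foldl pvStepB (parts, prev)).1
      = parts ++ as.flatMap (fun a => a :: (f a).map (fun r => r.2.1)) := by
  intro as
  induction as with
  | nil => intro _ _ parts prev _; simp
  | cons a as ih =>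
    intro hblk hpair parts prev hprev
    simp only [List.flatMap_cons, List.foldl_append]
    rw [pv_pass_block a (f a) parts prev (hblk a (by simp)).1 (hblk a (by simp)).2
      (hprev a (by simp))]
    rw [ih (fun b hb => hblk b (by simp [hb])) hpair.tail (parts ++ a :: (f a).map (fun r => r.2.1))
      (some a) (fun b hb hab => (List.pairwise_cons.mp hpair).1 b hb (by injection hab))]
    simp

-- A's parts-building fold is a flatMap
theorem pv_foldl_parts (g : String → List String) :
    ∀ (as : List String) (acc : List String),
    as.foldl (fun parts a => (parts ++ [a]) ++ g a) acc = acc ++ as.flatMap (fun a => a :: g a) := by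
  intro as
  induction as with
  | nil => intro acc; simp
  | cons a as ih => intro acc; rw [List.foldl_cons, ih]; simp

-- anchors sorted by A's anchor key, as a lexicographic sort
def pvAnchors (hint : PySem.Dict String Int) (M : List (String × String × Int)) : List String :=
  PySem.List.sorted (PySem.Set.ofList (M.map (fun q => q.1)))
    (fun a => (toLex (-(hint.getD a 0), a) : Int ×ₗ String))

-- the records of one anchor, sorted by A's target key
def pvBlock (M : List (String × String × Int)) (a : String) : List (String × String × Int) :=
  PySem.List.sorted (M.filter (fun q => q.1 == a)) (fun q => (toLex (-q.2.2, q.2.1) : Int ×ₗ String))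

-- the per-cbc core: A's nested grouping + two sorts = B's one sort + grouping pass
theorem pv_core (hint : PySem.Dict String Int)
    (M : List (String × String × Int)) (hM : (M.map (fun q => (q.1, q.2.1))).Nodup) :
    (PySem.List.sorted2
        (M.foldl (fun inner q => inner.modify q.1 [] (fun l => l ++ [(q.2.1, q.2.2)])) PySem.Dict.empty).keys
        (fun a => -(hint.getD a 0)) (fun a => a)).foldl
      (fun parts anchor =>
        (parts ++ [anchor]) ++
          (PySem.List.sorted2
            ((M.foldl (fun inner q => inner.modify q.1 [] (fun l => l ++ [(q.2.1, q.2.2)])) PySem.Dict.empty).getD anchor [])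
            (fun tc => -tc.2) (fun tc => tc.1)).map (fun tc => tc.1)) []
    = ((PySem.List.sorted M (pvKeyB hint)).foldl pvStepB ([], none)).1 := by
  have hMnd : M.Nodup := List.Nodup.of_map _ hM
  have hkeys : (M.foldl (fun inner q => inner.modify q.1 [] (fun l => l ++ [(q.2.1, q.2.2)])) PySem.Dict.empty).keys
      = PySem.Set.ofList (M.map (fun q => q.1)) := by
    rw [PySem.Dict.keys_foldl_modify_key M (fun q => q.1) [] (fun _ q => fun l => l ++ [(q.2.1, q.2.2)]) PySem.Dict.empty]
    rw [PySem.Dict.keys_empty, PySem.Set.update_nil_left]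
  have hget : ∀ a, (M.foldl (fun inner q => inner.modify q.1 [] (fun l => l ++ [(q.2.1, q.2.2)])) PySem.Dict.empty).getD a []
      = (M.filter (fun q => q.1 == a)).map (fun q => (q.2.1, q.2.2)) := by
    intro a
    rw [pv_getD_foldl_modify_filter M (fun q => q.1) [] (fun q l => l ++ [(q.2.1, q.2.2)]) PySem.Dict.empty a]
    rw [PySem.Dict.getD_empty, ← List.foldl_map (f := fun q : String × String × Int => (q.2.1, q.2.2))
      (g := fun (v : List (String × Int)) y => v ++ [y]), PySem.List.foldl_append_singleton]
    simp
  have hamem : ∀ a, a ∈ pvAnchors hint M ↔ ∃ q ∈ M, q.1 = a := by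
    intro a
    simp [pvAnchors, PySem.List.mem_sorted, PySem.Set.mem_ofList, eq_comm]
  have hanod : (pvAnchors hint M).Nodup :=
    ((PySem.List.sorted_perm _ _ _).nodup_iff).mpr (PySem.Set.nodup_ofList _)
  have hblockmem : ∀ a, ∀ r ∈ pvBlock M a, r.1 = a := by
    intro a r hr
    have := (List.mem_filter.mp ((PySem.List.mem_sorted _ _ _ _).mp hr)).2
    simpa using this
  have hblockperm : ∀ a, (pvBlock M a).Perm (M.filter (fun q => q.1 == a)) :=
    fun a => PySem.List.sorted_perm _ _ _
  have hS : PySem.List.sorted M (pvKeyB hint) = (pvAnchors hint M).flatMap (pvBlock M) := by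
    apply PySem.List.sorted_eq_of_perm_of_pairwise_lt
    · exact (pv_perm_flatMap_congr (fun a _ => hblockperm a)).trans
        (pv_perm_flatMap_filter (fun q => q.1) (pvAnchors hint M) M hanod
          (fun r hr => (hamem r.1).mpr ⟨r, hr, rfl⟩))
    · rw [List.pairwise_flatMap]
      constructor
      · intro a ha
        have hle := PySem.List.sorted_pairwise (M.filter (fun q => q.1 == a))
          (fun q => (toLex (-q.2.2, q.2.1) : Int ×ₗ String))
        have hnd2 : (pvBlock M a).Nodup := ((hblockperm a).nodup_iff).mpr (hMnd.filter _)
        refine ((hle.and hnd2).imp_of_mem ?_)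
        intro x y hx hy hxy
        have hxa := hblockmem a x hx
        have hya := hblockmem a y hy
        have hlt : (toLex (-x.2.2, x.2.1) : Int ×ₗ String) < toLex (-y.2.2, y.2.1) := by
          refine lt_of_le_of_ne hxy.1 (fun he => hxy.2 ?_)
          have h2 : -x.2.2 = -y.2.2 ∧ x.2.1 = y.2.1 := by
            simpa [Prod.ext_iff] using toLex.injective he
          have : x.2.2 = y.2.2 := by omega
          calc x = (x.1, x.2.1, x.2.2) := rfl
            _ = (y.1, y.2.1, y.2.2) := by rw [hxa, hya, h2.2, this]
            _ = y := rfl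
        show pvKeyB hint x < pvKeyB hint y
        rw [pvKeyB, pvKeyB, hxa, hya, Prod.Lex.toLex_lt_toLex]
        right
        exact ⟨rfl, by rw [Prod.Lex.toLex_lt_toLex]; right; exact ⟨rfl, hlt⟩⟩
      · have hle := PySem.List.sorted_pairwise (PySem.Set.ofList (M.map (fun q => q.1)))
          (fun a => (toLex (-(hint.getD a 0), a) : Int ×ₗ String))
        have hpw : (pvAnchors hint M).Pairwise
            (fun a b => (toLex (-(hint.getD a 0), a) : Int ×ₗ String) < toLex (-(hint.getD b 0), b)) := by
          refine (hle.and hanod).imp ?_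
          intro a b hab
          refine lt_of_le_of_ne hab.1 (fun he => hab.2 ?_)
          exact (Prod.ext_iff.mp (toLex.injective he)).2
        refine hpw.imp_of_mem ?_
        intro a b ha hb hab x hx y hy
        have hxa := hblockmem a x hx
        have hyb := hblockmem b y hy
        show pvKeyB hint x < pvKeyB hint y
        rw [pvKeyB, pvKeyB, hxa, hyb, Prod.Lex.toLex_lt_toLex]
        rcases (Prod.Lex.toLex_lt_toLex).mp hab with h | ⟨h1, h2⟩
        · exact Or.inl h
        · exact Or.inr ⟨h1, by rw [Prod.Lex.toLex_lt_toLex]; exact Or.inl h2⟩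
  have hblockne : ∀ a ∈ pvAnchors hint M, pvBlock M a ≠ [] := by
    intro a ha hnil
    rcases (hamem a).mp ha with ⟨q, hq, rfl⟩
    have : q ∈ M.filter (fun q' => q'.1 == q.1) := List.mem_filter.mpr ⟨hq, by simp⟩
    rw [pvBlock, PySem.List.sorted_eq_nil_iff] at hnil
    rw [hnil] at this
    exact absurd this (List.not_mem_nil)
  rw [hkeys, pv_sorted2_eq_sorted_lex, hS]
  rw [pv_pass_blocks (pvBlock M) (pvAnchors hint M)
    (fun a ha => ⟨hblockne a ha, hblockmem a⟩) hanod [] none (fun a _ => by simp)]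
  rw [pv_foldl_parts]
  rw [List.nil_append, List.nil_append]
  refine pv_flatMap_congr_mem (fun a ha => ?_)
  rw [hget a, pv_sorted2_eq_sorted_lex, pv_sorted_map, List.map_map]
  rfl

-- a fold of modifies keyed by cbc followed by an insert-per-item loop, as a map over the cbc set
theorem pv_outer {ν : Type} (counts : List (String × String × String × Int)) (d0 : ν)
    (F : (String × String × String × Int) → ν → ν) (G : String → ν → String) :
    ((counts.foldl (fun d r => d.modify r.1 d0 (F r)) PySem.Dict.empty).items.foldl
        (fun acc p => acc.insert p.1 (G p.1 p.2)) PySem.Dict.empty).items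
      = (PySem.Set.ofList (counts.map (fun r => r.1))).map
          (fun k => (k, G k ((counts.filter (fun r => r.1 == k)).foldl (fun v r => F r v) d0))) := by
  have hnod : (counts.foldl (fun d r => d.modify r.1 d0 (F r)) PySem.Dict.empty).keys.Nodup := by
    refine PySem.Dict.nodup_keys_foldl_modify_key counts (fun r => r.1) d0 (fun _ r => F r) PySem.Dict.empty ?_
    rw [PySem.Dict.keys_empty]; exact List.nodup_nil
  have hkeys : (counts.foldl (fun d r => d.modify r.1 d0 (F r)) PySem.Dict.empty).keys
      = PySem.Set.ofList (counts.map (fun r => r.1)) := by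
    rw [PySem.Dict.keys_foldl_modify_key counts (fun r => r.1) d0 (fun _ r => F r) PySem.Dict.empty,
      PySem.Dict.keys_empty, PySem.Set.update_nil_left]
  rw [PySem.Dict.items_eq_map_keys _ hnod d0, List.foldl_map, hkeys]
  rw [PySem.Dict.items_foldl_insert_fresh (PySem.Set.ofList (counts.map (fun r => r.1)))
    (fun k => k)
    (fun k => G k ((counts.foldl (fun d r => d.modify r.1 d0 (F r)) PySem.Dict.empty).getD k d0))
    PySem.Dict.empty (fun a _ => PySem.Dict.contains_empty a)
    (by rw [List.map_id']; exact PySem.Set.nodup_ofList _)]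
  have hemp : (PySem.Dict.empty : PySem.Dict String String).items = [] := rfl
  rw [hemp, List.nil_append]
  refine List.map_congr_left (fun k _ => ?_)
  rw [pv_getD_foldl_modify_filter counts (fun r => r.1) d0 F PySem.Dict.empty k, PySem.Dict.getD_empty]

-- the per-cbc Nodup fact B's strict sort key needs, extracted from Pre_
theorem pv_hM (counts : List (String × String × String × Int)) (cbc : String)
    (h0 : (counts.map (fun r => (r.1, r.2.1, r.2.2.1))).Nodup) :
    (((counts.filter (fun r => r.1 == cbc)).map (fun r => (r.2.1, r.2.2.1, r.2.2.2))).map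
        (fun q => (q.1, q.2.1))).Nodup := by
  rw [List.map_map]
  have h1 : ((counts.filter (fun r => r.1 == cbc)).map (fun r => (r.1, r.2.1, r.2.2.1))).Nodup :=
    List.Nodup.sublist (List.Sublist.map _ List.filter_sublist) h0
  have h2 := List.Nodup.map_on (f := fun t : String × String × String => t.2) ?_ h1
  · rw [List.map_map] at h2
    exact h2
  · intro x hx y hy hxy
    rcases List.mem_map.mp hx with ⟨r, hr, rfl⟩
    rcases List.mem_map.mp hy with ⟨r', hr', rfl⟩
    have hc : r.1 = cbc := by simpa using (List.mem_filter.mp hr).2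
    have hc' : r'.1 = cbc := by simpa using (List.mem_filter.mp hr').2
    simp only [Prod.ext_iff] at hxy ⊢
    exact ⟨hc.trans hc'.symm, hxy⟩

-- ===== VERDICT (by name: the statement is the Claim_ definition above) =====
theorem build_sequences_spec : Claim_equal_build_sequences := by
  intro counts order_hint _ hpre
  unfold Spec_build_sequences
  simp only [build_sequences, build_sequences_alt]
  rw [pv_outer counts PySem.Dict.empty
      (fun r inner => inner.modify r.2.1 [] (fun l => l ++ [(r.2.2.1, r.2.2.2)]))
      (fun cbc (am : PySem.Dict String (List (String × Int))) => PySem.Str.join ""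
        ((PySem.List.sorted2 am.keys (fun a => -((pvHintDict order_hint cbc).getD a 0)) (fun a => a)).foldl
          (fun parts anchor =>
            (parts ++ [anchor]) ++
              (PySem.List.sorted2 (am.getD anchor []) (fun tc : String × Int => -tc.2)
                (fun tc : String × Int => tc.1)).map (fun tc : String × Int => tc.1)) []))]
  rw [pv_outer counts ([] : List (String × String × Int))
      (fun r l => l ++ [(r.2.1, r.2.2.1, r.2.2.2)])
      (fun cbc recs => PySem.Str.join ""
        ((PySem.List.sorted recs (pvKeyB (pvHintDict order_hint cbc))).foldl pvStepB ([], none)).1)]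
  refine List.map_congr_left (fun cbc _ => ?_)
  have hMrw : (counts.filter (fun r => r.1 == cbc)).foldl
        (fun v r => v ++ [(r.2.1, r.2.2.1, r.2.2.2)]) ([] : List (String × String × Int))
      = (counts.filter (fun r => r.1 == cbc)).map (fun r => (r.2.1, r.2.2.1, r.2.2.2)) := by
    rw [← List.foldl_map (f := fun r : String × String × String × Int => (r.2.1, r.2.2.1, r.2.2.2))
      (g := fun (v : List (String × String × Int)) y => v ++ [y]),
      PySem.List.foldl_append_singleton, List.nil_append]
  have hArw : (counts.filter (fun r => r.1 == cbc)).foldl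
        (fun v r => v.modify r.2.1 [] (fun l => l ++ [(r.2.2.1, r.2.2.2)]))
        (PySem.Dict.empty : PySem.Dict String (List (String × Int)))
      = ((counts.filter (fun r => r.1 == cbc)).map (fun r => (r.2.1, r.2.2.1, r.2.2.2))).foldl
          (fun inner q => inner.modify q.1 [] (fun l => l ++ [(q.2.1, q.2.2)])) PySem.Dict.empty := by
    rw [List.foldl_map]
  rw [hMrw, hArw]
  exact congrArg (fun st => (cbc, PySem.Str.join "" st))
    (pv_core (pvHintDict order_hint cbc)
      ((counts.filter (fun r => r.1 == cbc)).map (fun r => (r.2.1, r.2.2.1, r.2.2.2)))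
      (pv_hM counts cbc hpre.1))
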